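-- pv_equiv track=rewrite | github.com/LucioRuizDiaz/IP-Algo-I | parciales/Python/Parcial Comision D 1c2024/parcial_comisionD_1c2024.py | filtrar_codigos_primos
-- ===== SOURCE A (Python) =====
-- def filtrar_codigos_primos(codigos_barra: list[int]) -> list[int]:
--     numeros_primos: list[int] = codigos_barra
--     numeros_tres_digitos: list[int] = []
--     numeros_final: list[int] = []
--
--     for numero in codigos_barra:
--         numero_3= numero%1000
--         numeros_tres_digitos.append(numero_3)
--
--     for i in range(len(numeros_tres_digitos)):
--         if (es_primo(numeros_tres_digitos[i])):
--             numeros_final.append(numeros_primos[i])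
--
--     return numeros_final
--
-- def es_primo(numero: int) -> bool:
--     res: bool = True
--     for i in range(2, numero):
--         if(numero%i == 0):
--             res = False
--     if(numero == 1):
--         res = True
--
--     return res
-- ===== SOURCE B (Python) =====
-- def filtrar_codigos_primos(codigos_barra: list[int]) -> list[int]:
--     resultado: list[int] = []
--     for numero in codigos_barra:
--         m = numero % 1000
--         es_primo_m = True
--         i = 2
--         while i * i <= m:
--             if m % i == 0:
--                 es_primo_m = False
--                 break
--             i += 1
--         if es_primo_m:
--             resultado.append(numero)
--     return resultado
-- ===== Notes on version B (the rewrite author's own statement) =====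
-- stated objective: faster
-- what changed: Single pass over the list (no intermediate residue list, no index loop) with primality tested by trial division only up to sqrt(m) via a while i*i<=m loop with early break, instead of A's full range(2,m) scan that never breaks.
import Mathlib
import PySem

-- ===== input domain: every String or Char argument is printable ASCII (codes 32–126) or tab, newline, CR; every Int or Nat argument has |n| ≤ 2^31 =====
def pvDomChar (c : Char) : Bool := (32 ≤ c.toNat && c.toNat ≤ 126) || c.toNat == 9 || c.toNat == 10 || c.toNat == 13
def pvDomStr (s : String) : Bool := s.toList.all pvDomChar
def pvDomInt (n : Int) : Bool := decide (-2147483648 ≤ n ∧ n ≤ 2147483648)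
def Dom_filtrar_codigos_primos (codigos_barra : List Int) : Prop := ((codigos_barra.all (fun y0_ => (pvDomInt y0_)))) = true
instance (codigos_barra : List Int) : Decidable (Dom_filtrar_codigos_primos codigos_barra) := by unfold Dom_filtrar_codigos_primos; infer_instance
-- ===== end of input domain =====

-- B: one pass, trial division bounded by i*i ≤ m with early break, instead of A's two passes and full range(2,m) scan.


-- ===== PORT A =====
def es_primo (numero : Int) : Bool :=
  let res := (PySem.List.pyRange 2 numero 1).foldl
    (fun res i => if PySem.Int.mod numero i == 0 then false else res) true
  if numero == 1 then true else res

def filtrar_codigos_primos (codigos_barra : List Int) : List Int :=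
  let numeros_primos := codigos_barra
  let numeros_tres_digitos := codigos_barra.foldl
    (fun acc numero => acc ++ [PySem.Int.mod numero 1000]) []
  (PySem.List.pyRange 0 (PySem.List.len numeros_tres_digitos) 1).foldl
    (fun acc i => if es_primo (PySem.List.pyGetD numeros_tres_digitos i 0)
                  then acc ++ [PySem.List.pyGetD numeros_primos i 0] else acc) []

-- ===== PORT B =====
-- the 'while i * i <= m' loop of Source B ('break' = the early 'false' return)
def trial_loop (m i : Int) : Bool :=
  if _h : i * i ≤ m then
    if PySem.Int.mod m i == 0 then false else trial_loop m (i + 1)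
  else true
termination_by (m + 1 - i).toNat
decreasing_by
  have hi : i ≤ m := by nlinarith
  omega

def filtrar_codigos_primos_alt (codigos_barra : List Int) : List Int :=
  codigos_barra.foldl (fun resultado numero =>
    if trial_loop (PySem.Int.mod numero 1000) 2 then resultado ++ [numero] else resultado) []

-- ===== PRECONDITION & SPEC =====
def Spec_filtrar_codigos_primos (codigos_barra : List Int) (out : List Int) : Prop := out = filtrar_codigos_primos_alt codigos_barra
instance (codigos_barra : List Int) (out : List Int) : Decidable (Spec_filtrar_codigos_primos codigos_barra out) := by unfold Spec_filtrar_codigos_primos; infer_instance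

-- ===== CLAIM (what is proved, stated in full; the proofs are below) =====
def Claim_equal_filtrar_codigos_primos : Prop := ∀ (codigos_barra : List Int), Dom_filtrar_codigos_primos codigos_barra → Spec_filtrar_codigos_primos codigos_barra (filtrar_codigos_primos codigos_barra)

-- ===== LEMMAS AND PROOFS =====

-- A's inner flag loop: once false, stays false
lemma foldl_flag_false (m : Int) (l : List Int) :
    l.foldl (fun res i => if PySem.Int.mod m i == 0 then false else res) false = false := by
  induction l with
  | nil => rfl
  | cons a l ih => simp only [List.foldl_cons]; split <;> exact ih

lemma foldl_flag_true_iff (m : Int) (l : List Int) :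
    l.foldl (fun res i => if PySem.Int.mod m i == 0 then false else res) true = true ↔
      ∀ i ∈ l, ¬ (i ∣ m) := by
  induction l with
  | nil => simp
  | cons a l ih =>
    simp only [List.foldl_cons, List.mem_cons]
    by_cases h : PySem.Int.mod m a = 0
    · rw [if_pos (by simp [h]), foldl_flag_false]
      have hd : a ∣ m := (PySem.Int.mod_eq_zero_iff_dvd m a).mp h
      constructor
      · intro hft; exact absurd hft (by simp)
      · intro hall; exact False.elim (absurd hd (hall a (Or.inl rfl)))
    · rw [if_neg (by simp [h]), ih]
      have hnd : ¬ (a ∣ m) := fun hd => h ((PySem.Int.mod_eq_zero_iff_dvd m a).mpr hd)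
      constructor
      · rintro hall i (rfl | hi)
        · exact hnd
        · exact hall i hi
      · intro hall i hi; exact hall i (Or.inr hi)

lemma es_primo_true_iff (m : Int) :
    es_primo m = true ↔ (m = 1 ∨ ∀ i : Int, 2 ≤ i → i < m → ¬ (i ∣ m)) := by
  unfold es_primo
  by_cases h1 : m = 1
  · simp [h1]
  · rw [if_neg (by simp [h1]), foldl_flag_true_iff]
    constructor
    · intro hall
      right; intro i h2 him
      exact hall i (PySem.List.mem_pyRange_one.mpr ⟨h2, him⟩)
    · rintro (h | hall) i hi
      · exact absurd h h1
      · obtain ⟨h2, him⟩ := PySem.List.mem_pyRange_one.mp hi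
        exact hall i h2 him

lemma trial_loop_true_iff (m i : Int) (h2 : 2 ≤ i) :
    trial_loop m i = true ↔ ∀ j : Int, i ≤ j → j * j ≤ m → ¬ (j ∣ m) := by
  rw [trial_loop]
  by_cases h : i * i ≤ m
  · simp only [h, dite_true]
    by_cases hm : PySem.Int.mod m i = 0
    · have hd : i ∣ m := (PySem.Int.mod_eq_zero_iff_dvd m i).mp hm
      simp only [beq_iff_eq, hm, if_true]
      constructor
      · intro hfalse; exact absurd hfalse (by simp)
      · intro hall; exact absurd hd (hall i le_rfl h)
    · have hnd : ¬ (i ∣ m) := fun hd => hm ((PySem.Int.mod_eq_zero_iff_dvd m i).mpr hd)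
      simp only [beq_iff_eq, hm, if_false]
      rw [trial_loop_true_iff m (i + 1) (by omega)]
      constructor
      · intro hall j hij hjj
        rcases eq_or_lt_of_le hij with rfl | hlt
        · exact hnd
        · exact hall j (by omega) hjj
      · intro hall j hij hjj; exact hall j (by omega) hjj
  · simp only [h, dite_false]
    constructor
    · intro _ j hij hjj
      exfalso; exact h (le_trans (by nlinarith) hjj)
    · intro _; trivial
termination_by (m + 1 - i).toNat
decreasing_by
  have hi : i ≤ m := by nlinarith
  omega

-- the crux: scanning to m and scanning to √m agree for m ≥ 0
lemma crux (m : Int) (hm : 0 ≤ m) :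
    (m = 1 ∨ ∀ i : Int, 2 ≤ i → i < m → ¬ (i ∣ m)) ↔
      (∀ i : Int, 2 ≤ i → i * i ≤ m → ¬ (i ∣ m)) := by
  constructor
  · rintro (rfl | hall) i h2 hii hd
    · nlinarith
    · exact hall i h2 (by nlinarith) hd
  · intro hall
    right; intro i h2 him hd
    obtain ⟨k, hk⟩ := hd
    have hk0 : 0 < k := by nlinarith
    have hk1 : k ≠ 1 := by
      intro h; rw [h, mul_one] at hk; omega
    have hk2 : 2 ≤ k := by omega
    rcases le_or_gt (i * i) m with hii | hii
    · exact hall i h2 hii ⟨k, hk⟩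
    · have hkk : k * k ≤ m := by nlinarith
      exact hall k hk2 hkk ⟨i, by rw [hk]; ring⟩

lemma pointwise (n : Int) :
    es_primo (PySem.Int.mod n 1000) = trial_loop (PySem.Int.mod n 1000) 2 := by
  set m := PySem.Int.mod n 1000 with hm
  have hm0 : 0 ≤ m := PySem.Int.mod_nonneg n (by norm_num)
  have h1 := es_primo_true_iff m
  have h2 := trial_loop_true_iff m 2 le_rfl
  have h3 := crux m hm0
  cases hA : es_primo m <;> cases hB : trial_loop m 2
  · rfl
  · exfalso
    have := h1.mpr (h3.mpr (fun i hi hii => (h2.mp hB) i hi hii))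
    simp [hA] at this
  · exfalso
    have := h2.mpr ?_
    · simp [hB] at this
    · intro j hj hjj
      exact h3.mp (h1.mp hA) j hj hjj
  · rfl

lemma A_eq_filter (codigos_barra : List Int) :
    filtrar_codigos_primos codigos_barra
      = codigos_barra.filter (fun n => es_primo (PySem.Int.mod n 1000)) := by
  unfold filtrar_codigos_primos
  simp only [PySem.List.foldl_append_singleton_eq_map, List.nil_append, PySem.List.len_eq,
    List.length_map]
  have hbody : (fun (acc : List Int) (i : Int) =>
      if es_primo (PySem.List.pyGetD (codigos_barra.map (fun n => PySem.Int.mod n 1000)) i 0)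
      then acc ++ [PySem.List.pyGetD codigos_barra i 0] else acc)
      = (fun acc i =>
      if es_primo (PySem.Int.mod (PySem.List.pyGetD codigos_barra i 0) 1000)
      then acc ++ [PySem.List.pyGetD codigos_barra i 0] else acc) := by
    funext acc i
    have hg : PySem.List.pyGetD (codigos_barra.map (fun n => PySem.Int.mod n 1000)) i (0 : Int)
        = PySem.Int.mod (PySem.List.pyGetD codigos_barra i 0) 1000 :=
      PySem.List.pyGetD_map (fun n => PySem.Int.mod n 1000) codigos_barra i 0
    rw [hg]
  rw [hbody,
    PySem.List.foldl_pyRange_zero_pyGetD' codigos_barra 0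
      (fun acc x => if es_primo (PySem.Int.mod x 1000) then acc ++ [x] else acc) [],
    PySem.List.foldl_append_if_eq_filter]
  simp

lemma B_eq_filter (codigos_barra : List Int) :
    filtrar_codigos_primos_alt codigos_barra
      = codigos_barra.filter (fun n => trial_loop (PySem.Int.mod n 1000) 2) := by
  unfold filtrar_codigos_primos_alt
  rw [PySem.List.foldl_append_if_eq_filter]
  simp

-- ===== VERDICT (by name: the statement is the Claim_ definition above) =====
theorem filtrar_codigos_primos_spec : Claim_equal_filtrar_codigos_primos := by
  intro codigos_barra _
  unfold Spec_filtrar_codigos_primos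
  rw [A_eq_filter, B_eq_filter]
  exact List.filter_congr (fun n _ => pointwise n)
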